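-- pv_equiv track=rewrite | github.com/anuwardeen/Final-BankWebApp-version2 | bankWebApp/management/commands/createrecords.py | getting_new_bank_id
-- ===== SOURCE A (Python) =====
-- def getting_new_bank_id(last_id):
--     num = 0
--     for i in last_id:
--         if i.isdigit():
--             num = num * 10 + int(i)
--
--     num += 1
--     if num <= 9:
--         id_starts_from = "B0" + str(num)
--     else:
--         id_starts_from = "B" + str(num)
--
--     return id_starts_from
-- ===== SOURCE B (Python) =====
-- def _inc_rev(r):
--     """Add one to a little-endian (reversed) list of decimal digit characters,
--     ripple-carry style, without ever converting to an integer."""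
--     if not r:
--         return ['1']
--     if r[0] == '9':
--         return ['0'] + _inc_rev(r[1:])
--     return [chr(ord(r[0]) + 1)] + r[1:]
--
--
-- def getting_new_bank_id(last_id):
--     digits = [c for c in last_id if c.isdigit()]
--     out = _inc_rev(digits[::-1])[::-1]
--     while out and out[0] == '0':
--         out = out[1:]
--     return 'B' + ''.join(out).zfill(2)
-- ===== Notes on version B (the rewrite author's own statement) =====
-- stated objective: alternative
-- what changed: A parses the digits into an integer with Horner accumulation, adds 1 arithmetically and formats via an if/else on <=9; B never builds a number at all: it ripple-carry increments the digit characters themselves (little-endian recursion over the reversed digit list), strips leading zeros, and zero-pads the character string to width 2.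
import Mathlib
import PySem

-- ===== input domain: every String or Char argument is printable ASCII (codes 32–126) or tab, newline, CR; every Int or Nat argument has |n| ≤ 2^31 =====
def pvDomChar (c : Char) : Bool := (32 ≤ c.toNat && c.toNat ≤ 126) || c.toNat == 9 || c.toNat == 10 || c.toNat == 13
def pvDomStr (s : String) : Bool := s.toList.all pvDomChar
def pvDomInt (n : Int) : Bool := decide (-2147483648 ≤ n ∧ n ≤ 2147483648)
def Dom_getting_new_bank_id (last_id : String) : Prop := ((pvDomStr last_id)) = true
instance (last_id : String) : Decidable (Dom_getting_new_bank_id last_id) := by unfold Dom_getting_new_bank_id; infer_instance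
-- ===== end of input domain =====

-- B never builds a number: instead of A's parse-to-int / add 1 / format, it ripple-carry
-- increments the digit characters themselves, strips leading zeros and zero-pads; objective: alternative algorithm.

-- ===== PORT A =====
-- int(c) for a single character c (exact PySem primitive; the default is never reached:
-- A applies it only to characters that passed isdigit)
def pvDigitVal (c : Char) : Int := (PySem.Int.ofChars? [c]).getD 0

def getting_new_bank_id (last_id : String) : String :=
  let num : Int :=
    last_id.toList.foldl
      (fun num i => if PySem.Chars.isdigit i then num * 10 + pvDigitVal i else num) 0
  let num := num + 1
  if num ≤ 9 then "B0" ++ PySem.Int.toStr num else "B" ++ PySem.Int.toStr num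

-- ===== PORT B =====
-- _inc_rev: add one to a little-endian (reversed) list of digit characters, ripple carry
def pvIncRev : List Char → List Char
  | [] => ['1']
  | c :: t => if c = '9' then '0' :: pvIncRev t else [Char.ofNat (c.toNat + 1)] ++ t

-- the 'while out and out[0] == '0': out = out[1:]' loop
def pvStrip0 : List Char → List Char
  | [] => []
  | c :: t => if c = '0' then pvStrip0 t else c :: t

def getting_new_bank_id_alt (last_id : String) : String :=
  let digits : List Char := last_id.toList.filter PySem.Chars.isdigit
  let out := (pvIncRev digits.reverse).reverse
  let out := pvStrip0 out
  "B" ++ PySem.Str.zfill (String.ofList out) 2   -- ''.join(out).zfill(2)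

-- ===== PRECONDITION & SPEC =====
def Spec_getting_new_bank_id (last_id : String) (out : String) : Prop := out = getting_new_bank_id_alt last_id
instance (last_id : String) (out : String) : Decidable (Spec_getting_new_bank_id last_id out) := by unfold Spec_getting_new_bank_id; infer_instance

-- ===== CLAIM =====
def Claim_equal_getting_new_bank_id : Prop := ∀ (last_id : String), Dom_getting_new_bank_id last_id → Spec_getting_new_bank_id last_id (getting_new_bank_id last_id)

-- ===== LEMMAS AND PROOFS =====

-- numeric value of a digit character
def pvDval (c : Char) : Nat := c.toNat - 48

-- most-significant-first (Horner) value of a digit string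
def pvVfold (ds : List Char) : Nat := ds.foldl (fun n c => 10 * n + pvDval c) 0

-- least-significant-first value
def pvValR : List Char → Nat
  | [] => 0
  | c :: t => pvDval c + 10 * pvValR t

-- canonical decimal representation of a Nat (reference model of str(n) for n ≥ 0)
def pvD (n : Nat) : List Char :=
  if _ : n < 10 then [Nat.digitChar n]
  else pvD (n / 10) ++ [Nat.digitChar (n % 10)]
decreasing_by exact Nat.div_lt_self (by omega) (by omega)

theorem pv_digit_cases (c : Char) (h : PySem.Chars.isdigit c = true) :
    c = '0' ∨ c = '1' ∨ c = '2' ∨ c = '3' ∨ c = '4' ∨ c = '5' ∨ c = '6' ∨ c = '7' ∨ c = '8' ∨ c = '9' := by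
  simp only [PySem.Chars.isdigit, Bool.and_eq_true, decide_eq_true_eq, Char.le_def,
    UInt32.le_iff_toNat_le] at h
  have hc : Char.ofNat c.toNat = c := Char.ofNat_toNat c
  have h48 : 48 ≤ c.toNat := h.1
  have h57 : c.toNat ≤ 57 := h.2
  interval_cases hh : c.toNat <;> (subst hc; decide)

theorem pvDigitVal_eq_dval (c : Char) (h : PySem.Chars.isdigit c = true) :
    pvDigitVal c = (pvDval c : Int) := by
  rcases pv_digit_cases c h with rfl | rfl | rfl | rfl | rfl | rfl | rfl | rfl | rfl | rfl <;> decide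

theorem pvDval_lt (c : Char) (h : PySem.Chars.isdigit c = true) : pvDval c < 10 := by
  rcases pv_digit_cases c h with rfl | rfl | rfl | rfl | rfl | rfl | rfl | rfl | rfl | rfl <;> decide

theorem pvDval_pos (c : Char) (h : PySem.Chars.isdigit c = true) (h0 : c ≠ '0') : 1 ≤ pvDval c := by
  rcases pv_digit_cases c h with rfl | rfl | rfl | rfl | rfl | rfl | rfl | rfl | rfl | rfl <;> simp_all <;> decide

theorem pv_isdigit_digitChar (m : Nat) (h : m < 10) : PySem.Chars.isdigit (Nat.digitChar m) = true := by
  interval_cases m <;> decide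

theorem pvDval_digitChar (m : Nat) (h : m < 10) : pvDval (Nat.digitChar m) = m := by
  interval_cases m <;> decide

-- value of B's fold seen from the right
theorem pvVfold_append (ds : List Char) (c : Char) :
    pvVfold (ds ++ [c]) = 10 * pvVfold ds + pvDval c := by
  unfold pvVfold
  rw [List.foldl_append]
  rfl

theorem pvVfold_reverse (r : List Char) : pvVfold r.reverse = pvValR r := by
  induction r with
  | nil => rfl
  | cons c t ih => rw [List.reverse_cons, pvVfold_append, ih]; simp [pvValR]; ring

-- A's digit fold computes pvVfold
theorem pv_foldA (ds : List Char) (h : ∀ c ∈ ds, PySem.Chars.isdigit c = true) :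
    ds.foldl (fun (n : Int) c => n * 10 + pvDigitVal c) 0 = (pvVfold ds : Int) := by
  induction ds using List.reverseRecOn with
  | nil => rfl
  | append_singleton ds c ih =>
      rw [List.foldl_append]
      simp only [List.foldl_cons, List.foldl_nil]
      rw [ih (fun x hx => h x (by simp [hx]))]
      rw [pvVfold_append, pvDigitVal_eq_dval c (h c (by simp))]
      push_cast; ring

-- the ripple-carry increment adds one
theorem pvValR_incRev (r : List Char) (h : ∀ c ∈ r, PySem.Chars.isdigit c = true) :
    pvValR (pvIncRev r) = pvValR r + 1 := by
  induction r with
  | nil => rfl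
  | cons c t ih =>
      have hc := h c (by simp)
      by_cases h9 : c = '9'
      · subst h9
        have hstep : pvIncRev ('9' :: t) = '0' :: pvIncRev t := by simp [pvIncRev]
        rw [hstep]
        simp only [pvValR]
        rw [ih (fun x hx => h x (by simp [hx]))]
        have h0 : pvDval '0' = 0 := by decide
        have h9v : pvDval '9' = 9 := by decide
        rw [h0, h9v]; omega
      · rcases pv_digit_cases c hc with rfl | rfl | rfl | rfl | rfl | rfl | rfl | rfl | rfl | rfl <;>
          simp_all [pvIncRev, pvValR, pvDval] <;> omega
  
theorem pv_incRev_digits (r : List Char) (h : ∀ c ∈ r, PySem.Chars.isdigit c = true) :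
    ∀ c ∈ pvIncRev r, PySem.Chars.isdigit c = true := by
  induction r with
  | nil => intro c hc; simp [pvIncRev] at hc; subst hc; decide
  | cons c t ih =>
      have hc := h c (by simp)
      by_cases h9 : c = '9'
      · subst h9
        intro x hx
        simp only [pvIncRev, if_true] at hx
        rcases List.mem_cons.mp hx with rfl | hx
        · decide
        · exact ih (fun y hy => h y (by simp [hy])) x hx
      · intro x hx
        rcases pv_digit_cases c hc with rfl | rfl | rfl | rfl | rfl | rfl | rfl | rfl | rfl | rfl <;>
          simp_all [pvIncRev] <;> rcases hx with rfl | hx <;> first | decide | exact h x (by simp [hx])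

-- stripping leading zeros
theorem pvVfold_strip0 (l : List Char) : pvVfold (pvStrip0 l) = pvVfold l := by
  induction l with
  | nil => rfl
  | cons c t ih =>
      by_cases h0 : c = '0'
      · subst h0
        have hstep : pvStrip0 ('0' :: t) = pvStrip0 t := by simp [pvStrip0]
        have hd0 : pvDval '0' = 0 := by decide
        have hv : pvVfold ('0' :: t) = pvVfold t := by
          unfold pvVfold
          rw [List.foldl_cons, hd0]
        rw [hstep, ih, hv]
      · simp [pvStrip0, h0]

theorem pvStrip0_digits (l : List Char) (h : ∀ c ∈ l, PySem.Chars.isdigit c = true) :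
    ∀ c ∈ pvStrip0 l, PySem.Chars.isdigit c = true := by
  induction l with
  | nil => simp [pvStrip0]
  | cons c t ih =>
      by_cases h0 : c = '0'
      · subst h0; simpa [pvStrip0] using ih (fun x hx => h x (by simp [hx]))
      · simpa [pvStrip0, h0] using h

theorem pvStrip0_head (l : List Char) : pvStrip0 l = [] ∨ (pvStrip0 l).head? ≠ some '0' := by
  induction l with
  | nil => left; rfl
  | cons c t ih =>
      by_cases h0 : c = '0'
      · subst h0; simpa [pvStrip0] using ih
      · right; simp [pvStrip0, h0]

-- positivity of pvValR for a digit list whose most significant digit is nonzero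
theorem pvValR_pos (r : List Char) (hd : ∀ c ∈ r, PySem.Chars.isdigit c = true)
    (hne : r ≠ []) (hl : r.getLast? ≠ some '0') : 1 ≤ pvValR r := by
  induction r with
  | nil => exact absurd rfl hne
  | cons c t ih =>
      cases t with
      | nil =>
          simp only [List.getLast?_singleton] at hl
          have : c ≠ '0' := by intro h; exact hl (by rw [h])
          have := pvDval_pos c (hd c (by simp)) this
          simp [pvValR]; omega
      | cons d t' =>
          have := ih (fun x hx => hd x (by simp [hx])) (by simp)
            (by rwa [List.getLast?_cons_cons] at hl)
          have hstep : pvValR (c :: d :: t') = pvDval c + 10 * pvValR (d :: t') := rfl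
          rw [hstep]; omega

-- uniqueness of the (little-endian) decimal representation without a leading zero
theorem pvValR_inj (r : List Char) : ∀ s : List Char,
    (∀ c ∈ r, PySem.Chars.isdigit c = true) → (∀ c ∈ s, PySem.Chars.isdigit c = true) →
    r.getLast? ≠ some '0' → s.getLast? ≠ some '0' → pvValR r = pvValR s → r = s := by
  induction r with
  | nil =>
      intro s _ hsd _ hsl hv
      cases s with
      | nil => rfl
      | cons c t =>
          exfalso
          have := pvValR_pos (c :: t) hsd (by simp) hsl
          rw [show pvValR ([] : List Char) = 0 from rfl] at hv; omega
  | cons c t ih =>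
      intro s hrd hsd hrl hsl hv
      cases s with
      | nil =>
          exfalso
          have := pvValR_pos (c :: t) hrd (by simp) hrl
          rw [show pvValR ([] : List Char) = 0 from rfl] at hv; omega
      | cons d u =>
          have hcd : pvDval c < 10 := pvDval_lt c (hrd c (by simp))
          have hdd : pvDval d < 10 := pvDval_lt d (hsd d (by simp))
          simp only [pvValR] at hv
          have hde : pvDval c = pvDval d := by omega
          have hce : c = d := by
            have h1 : Nat.digitChar (pvDval c) = c := by
              rcases pv_digit_cases c (hrd c (by simp)) with rfl|rfl|rfl|rfl|rfl|rfl|rfl|rfl|rfl|rfl <;> decide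
            have h2 : Nat.digitChar (pvDval d) = d := by
              rcases pv_digit_cases d (hsd d (by simp)) with rfl|rfl|rfl|rfl|rfl|rfl|rfl|rfl|rfl|rfl <;> decide
            rw [← h1, ← h2, hde]
          subst hce
          have htl : t.getLast? ≠ some '0' := by
            cases t with
            | nil => simp
            | cons x y => rwa [List.getLast?_cons_cons] at hrl
          have hul : u.getLast? ≠ some '0' := by
            cases u with
            | nil => simp
            | cons x y => rwa [List.getLast?_cons_cons] at hsl
          have := ih u (fun x hx => hrd x (by simp [hx])) (fun x hx => hsd x (by simp [hx]))
            htl hul (by omega)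
          rw [this]

-- properties of the canonical representation pvD
theorem pvD_ne_nil (n : Nat) : pvD n ≠ [] := by
  unfold pvD
  split <;> simp

theorem pvD_digits (n : Nat) : ∀ c ∈ pvD n, PySem.Chars.isdigit c = true := by
  induction n using pvD.induct with
  | case1 n h =>
      intro c hc
      rw [pvD, dif_pos h] at hc
      simp at hc; subst hc
      exact pv_isdigit_digitChar n h
  | case2 n h ih =>
      intro c hc
      rw [pvD, dif_neg h] at hc
      rcases List.mem_append.mp hc with hc | hc
      · exact ih c hc
      · simp at hc; subst hc
        exact pv_isdigit_digitChar _ (Nat.mod_lt _ (by omega))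

theorem pvVfold_pvD (n : Nat) : pvVfold (pvD n) = n := by
  induction n using pvD.induct with
  | case1 n h =>
      rw [pvD, dif_pos h]
      show pvVfold [Nat.digitChar n] = n
      unfold pvVfold
      simp [pvDval_digitChar n h]
  | case2 n h ih =>
      rw [pvD, dif_neg h, pvVfold_append, ih, pvDval_digitChar _ (Nat.mod_lt _ (by omega))]
      omega

theorem pvD_head (n : Nat) (h1 : 1 ≤ n) : (pvD n).head? ≠ some '0' := by
  induction n using pvD.induct with
  | case1 n h =>
      rw [pvD, dif_pos h]
      interval_cases n <;> decide
  | case2 n h ih =>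
      rw [pvD, dif_neg h]
      have hne := pvD_ne_nil (n / 10)
      rw [List.head?_append_of_ne_nil _ hne]
      exact ih (by omega)

-- Nat.toDigits computes pvD
theorem pv_toDigitsCore (f : Nat) : ∀ (n : Nat) (acc : List Char), n < f →
    Nat.toDigitsCore 10 f n acc = pvD n ++ acc := by
  induction f with
  | zero => intro n acc h; omega
  | succ f ih =>
      intro n acc h
      have hstep : Nat.toDigitsCore 10 (f+1) n acc =
          (if n / 10 = 0 then (n % 10).digitChar :: acc
           else Nat.toDigitsCore 10 f (n / 10) ((n % 10).digitChar :: acc)) := by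
        conv_lhs => rw [Nat.toDigitsCore]
      rw [hstep]
      by_cases h0 : n / 10 = 0
      · have hn : n < 10 := by omega
        rw [if_pos h0, pvD, dif_pos hn, Nat.mod_eq_of_lt hn]
        rfl
      · have hn : ¬ n < 10 := by omega
        rw [if_neg h0, ih (n / 10) _ (by omega)]
        conv_rhs => rw [pvD]
        rw [dif_neg hn]
        simp

theorem pv_toChars_eq_pvD (n : Nat) : PySem.Int.toChars ((n : Nat) : Int) = pvD n := by
  have : ¬ ((n : Int) < 0) := by omega
  simp only [PySem.Int.toChars, if_neg this, Int.toNat_natCast]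
  show Nat.toDigits 10 n = pvD n
  unfold Nat.toDigits
  simpa using pv_toDigitsCore (n + 1) n [] (by omega)

-- zfill is the identity on strings of length ≥ 2
theorem pv_zfill_long (cs : List Char) (h : 2 ≤ cs.length) :
    PySem.Chars.zfill cs 2 = cs := by
  unfold PySem.Chars.zfill
  rw [if_pos (by exact_mod_cast h)]

-- pvD has at least two characters for n ≥ 10
theorem pvD_len2 (n : Nat) (h : 10 ≤ n) : 2 ≤ (pvD n).length := by
  rw [pvD, dif_neg (by omega)]
  have := pvD_ne_nil (n / 10)
  have : 1 ≤ (pvD (n / 10)).length := by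
    cases hh : pvD (n / 10) with
    | nil => exact absurd hh this
    | cons a b => simp
  simp [List.length_append]; omega

-- ===== VERDICT =====
theorem getting_new_bank_id_spec : Claim_equal_getting_new_bank_id := by
  intro last_id _
  unfold Spec_getting_new_bank_id getting_new_bank_id getting_new_bank_id_alt
  set cs := last_id.toList with hcs
  set digits := cs.filter PySem.Chars.isdigit with hdig
  have hdd : ∀ c ∈ digits, PySem.Chars.isdigit c = true := by
    intro c hc; exact (List.mem_filter.mp hc).2
  have hrd : ∀ c ∈ digits.reverse, PySem.Chars.isdigit c = true := by
    intro c hc; exact hdd c (List.mem_reverse.mp hc)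
  -- A's number
  have hA : cs.foldl (fun num i => if PySem.Chars.isdigit i then num * 10 + pvDigitVal i else num) 0
      = (pvVfold digits : Int) := by
    rw [PySem.List.foldl_if_eq_foldl_filter]
    exact pv_foldA digits hdd
  -- B's digit list
  set out := pvStrip0 (pvIncRev digits.reverse).reverse with hout
  set num := pvVfold digits + 1 with hnum
  have hod : ∀ c ∈ out, PySem.Chars.isdigit c = true := by
    apply pvStrip0_digits
    intro c hc
    exact pv_incRev_digits digits.reverse hrd c (List.mem_reverse.mp hc)
  have hov : pvVfold out = num := by
    rw [hout, pvVfold_strip0, pvVfold_reverse, pvValR_incRev digits.reverse hrd,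
      ← pvVfold_reverse, List.reverse_reverse]
  have hone : 1 ≤ num := by omega
  have hone' : out ≠ [] := by
    intro h
    rw [h] at hov
    have h0 : (0 : Nat) = num := hov
    omega
  have hohd : out.head? ≠ some '0' := by
    rcases pvStrip0_head (pvIncRev digits.reverse).reverse with h | h
    · exact absurd h hone'
    · exact h
  -- out is the canonical representation of num
  have hcanon : out = pvD num := by
    have h1 : out.reverse = (pvD num).reverse := by
      apply pvValR_inj
      · intro c hc; exact hod c (List.mem_reverse.mp hc)
      · intro c hc; exact pvD_digits num c (List.mem_reverse.mp hc)
      · rw [List.getLast?_reverse]; exact hohd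
      · rw [List.getLast?_reverse]; exact pvD_head num hone
      · rw [← pvVfold_reverse, List.reverse_reverse, ← pvVfold_reverse, List.reverse_reverse,
          hov, pvVfold_pvD]
    have := congrArg List.reverse h1
    simpa using this
  rw [hA]
  simp only []
  have hcast : (pvVfold digits : Int) + 1 = ((num : Nat) : Int) := by omega
  rw [hcast]
  by_cases h9 : ((num : Nat) : Int) ≤ 9
  · rw [if_pos h9]
    have h9' : num ≤ 9 := by omega
    rw [← String.toList_inj, String.toList_append, String.toList_append,
      PySem.Int.toList_toStr, PySem.Str.toList_zfill, pv_toChars_eq_pvD]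
    rw [show (String.ofList (pvStrip0 (pvIncRev digits.reverse).reverse)).toList
        = pvStrip0 (pvIncRev digits.reverse).reverse from by simp]
    rw [← hout, hcanon]
    have hnum10 : num < 10 := by omega
    rw [pvD, dif_pos hnum10]
    have hB0 : ("B0" : String).toList = ['B', '0'] := by decide
    have hB : ("B" : String).toList = ['B'] := by decide
    rw [hB0, hB]
    have hz : ∀ m : Nat, m < 10 → PySem.Chars.zfill [Nat.digitChar m] 2 = ['0', Nat.digitChar m] := by
      intro m hm; interval_cases m <;> decide
    rw [hz num hnum10]
    simp
  · rw [if_neg h9]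
    have h10 : 10 ≤ num := by omega
    rw [← String.toList_inj, String.toList_append, String.toList_append,
      PySem.Int.toList_toStr, PySem.Str.toList_zfill, pv_toChars_eq_pvD]
    rw [show (String.ofList (pvStrip0 (pvIncRev digits.reverse).reverse)).toList
        = pvStrip0 (pvIncRev digits.reverse).reverse from by simp]
    rw [← hout, hcanon, pv_zfill_long _ (pvD_len2 num h10)]
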